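-- pv_equiv track=rewrite | github.com/HARADA1029/shopify-business | ops/monitoring/strategic_pdca.py | evaluate_expansion
-- ===== SOURCE A (Python) =====
-- def evaluate_expansion(state):
--     """成功要素の横展開判断"""
--     details = ["=== Expansion Decision ==="]
--
--     elements = state.get("element_tests", [])
--     decisions = {
--         "expand_category": [],
--         "expand_channel": [],
--         "continue_local": [],
--         "stop": [],
--         "re_test": [],
--     }
--
--     for e in elements:
--         result = e.get("result")
--         if result == "success":
--             if not e.get("expansion"):
--                 decisions["expand_category"].append(e["name"])
--         elif result == "weak":
--             decisions["re_test"].append(e["name"])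
--         elif result == "failed":
--             decisions["stop"].append(e["name"])
--
--     if decisions["expand_category"]:
--         details.append("Expand to other categories: %s" % ", ".join(decisions["expand_category"]))
--     if decisions["re_test"]:
--         details.append("Re-test with adjustments: %s" % ", ".join(decisions["re_test"]))
--     if decisions["stop"]:
--         details.append("Stop (no impact): %s" % ", ".join(decisions["stop"]))
--     if not any(decisions.values()):
--         details.append("No decisions pending — elements still in testing")
--
--     return details
-- ===== SOURCE B (Python) =====
-- def evaluate_expansion(state):
--     """成功要素の横展開判断 — per-category scans driven by a spec table."""
--     elements = state.get("element_tests", [])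
--     specs = [
--         (lambda e: e.get("result") == "success" and not e.get("expansion"),
--          "Expand to other categories: %s"),
--         (lambda e: e.get("result") == "weak", "Re-test with adjustments: %s"),
--         (lambda e: e.get("result") == "failed", "Stop (no impact): %s"),
--     ]
--     details = ["=== Expansion Decision ==="]
--     emitted = False
--     for pred, template in specs:
--         names = [e["name"] for e in elements if pred(e)]
--         if names:
--             emitted = True
--             details.append(template % ", ".join(names))
--     if not emitted:
--         details.append("No decisions pending — elements still in testing")
--     return details
-- ===== Notes on version B (the rewrite author's own statement) =====
-- stated objective: idiomatic
-- what changed: Replaces A's single bucket-building pass over a five-key decisions dict with a spec table of (predicate, template) pairs and one per-category scan of the elements, emitting each line directly and tracking emission with a flag.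
import Mathlib
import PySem

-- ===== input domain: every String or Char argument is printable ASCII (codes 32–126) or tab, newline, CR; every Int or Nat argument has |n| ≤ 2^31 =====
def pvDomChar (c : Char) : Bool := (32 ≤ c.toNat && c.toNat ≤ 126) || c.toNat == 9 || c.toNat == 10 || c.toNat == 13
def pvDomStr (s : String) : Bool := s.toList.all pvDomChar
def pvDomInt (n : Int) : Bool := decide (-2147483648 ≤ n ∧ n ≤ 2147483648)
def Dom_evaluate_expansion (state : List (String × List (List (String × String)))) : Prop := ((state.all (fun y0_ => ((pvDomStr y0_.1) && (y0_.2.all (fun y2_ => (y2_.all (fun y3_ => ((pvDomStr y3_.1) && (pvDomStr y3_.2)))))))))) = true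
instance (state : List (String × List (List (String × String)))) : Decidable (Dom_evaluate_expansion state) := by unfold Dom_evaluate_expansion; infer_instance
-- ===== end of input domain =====

-- B replaces A's single bucket-building pass (a five-key decisions dict) with a spec
-- table of (predicate, template) pairs and one per-category scan; objective: idiomatic.
-- Pre_ excludes inputs where Python A (and B) raise KeyError: a reported element missing "name".

-- ===== PORT A =====

-- e.get(k) on an inner dict
def eeGet (e : List (String × String)) (k : String) : Option String :=
  (PySem.Dict.mk e).get? k

-- Python truthiness of `e.get(k)` for an Optional[str]
def eeTruthy (o : Option String) : Bool :=
  match o with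
  | none => false
  | some s => s ≠ ""

-- e["name"]; Pre_ guarantees the key is present (Python raises KeyError otherwise)
def eeName (e : List (String × String)) : String :=
  (eeGet e "name").getD ""

def evaluate_expansion (state : List (String × List (List (String × String)))) : List String :=
  let details := ["=== Expansion Decision ==="]
  let elements := ((PySem.Dict.mk state).get? "element_tests").getD []
  let decisions : PySem.Dict String (List String) :=
    PySem.Dict.mk [("expand_category", []), ("expand_channel", []),
                   ("continue_local", []), ("stop", []), ("re_test", [])]
  let decisions := elements.foldl (fun d e =>
    let result := eeGet e "result"
    if result == some "success" then
      if !eeTruthy (eeGet e "expansion") then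
        d.modify "expand_category" [] (· ++ [eeName e])
      else d
    else if result == some "weak" then
      d.modify "re_test" [] (· ++ [eeName e])
    else if result == some "failed" then
      d.modify "stop" [] (· ++ [eeName e])
    else d) decisions
  let details := if decisions.getD "expand_category" [] ≠ [] then
      details ++ [PySem.Str.join "" ["Expand to other categories: ",
        PySem.Str.join ", " (decisions.getD "expand_category" [])]]
    else details
  let details := if decisions.getD "re_test" [] ≠ [] then
      details ++ [PySem.Str.join "" ["Re-test with adjustments: ",
        PySem.Str.join ", " (decisions.getD "re_test" [])]]
    else details
  let details := if decisions.getD "stop" [] ≠ [] then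
      details ++ [PySem.Str.join "" ["Stop (no impact): ",
        PySem.Str.join ", " (decisions.getD "stop" [])]]
    else details
  let details := if !(decisions.values.any (fun v => v ≠ [])) then
      details ++ ["No decisions pending — elements still in testing"]
    else details
  details

-- ===== PORT B =====

-- the spec table: (predicate, line prefix for the template "…: %s")
def eeSpecs : List ((List (String × String) → Bool) × String) :=
  [(fun e => eeGet e "result" == some "success" && !eeTruthy (eeGet e "expansion"),
    "Expand to other categories: "),
   (fun e => eeGet e "result" == some "weak", "Re-test with adjustments: "),
   (fun e => eeGet e "result" == some "failed", "Stop (no impact): ")]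

def evaluate_expansion_alt (state : List (String × List (List (String × String)))) : List String :=
  let elements := ((PySem.Dict.mk state).get? "element_tests").getD []
  let init : List String × Bool := (["=== Expansion Decision ==="], false)
  let st := eeSpecs.foldl (fun acc spec =>
    let names := (elements.filter spec.1).map eeName
    if names ≠ [] then
      (acc.1 ++ [PySem.Str.join "" [spec.2, PySem.Str.join ", " names]], true)
    else acc) init
  if !st.2 then st.1 ++ ["No decisions pending — elements still in testing"] else st.1

-- ===== PRECONDITION & SPEC =====
-- Pre_ excludes exactly the inputs on which Python A raises KeyError: an element that
-- falls into a reported bucket (success-without-expansion, weak, failed) but has no "name" key.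
def Pre_evaluate_expansion (state : List (String × List (List (String × String)))) : Prop :=
  ∀ e ∈ ((PySem.Dict.mk state).get? "element_tests").getD [],
    ((eeGet e "result" = some "success" ∧ eeTruthy (eeGet e "expansion") = false)
      ∨ eeGet e "result" = some "weak" ∨ eeGet e "result" = some "failed")
    → (eeGet e "name").isSome = true
instance (state : List (String × List (List (String × String)))) : Decidable (Pre_evaluate_expansion state) := by unfold Pre_evaluate_expansion; infer_instance

def pvWitness_evaluate_expansion : (List (String × List (List (String × String)))) :=
  [("element_tests", [[("result", "success"), ("name", "a")],
                      [("result", "weak"), ("name", "b")],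
                      [("result", "pending")]])]

def Spec_evaluate_expansion (state : List (String × List (List (String × String)))) (out : List String) : Prop := out = evaluate_expansion_alt state
instance (state : List (String × List (List (String × String)))) (out : List String) : Decidable (Spec_evaluate_expansion state out) := by unfold Spec_evaluate_expansion; infer_instance

-- ===== CLAIM (what is proved, stated in full; the proofs are below) =====
def Claim_equal_evaluate_expansion : Prop := ∀ (state : List (String × List (List (String × String)))), Dom_evaluate_expansion state → Pre_evaluate_expansion state → Spec_evaluate_expansion state (evaluate_expansion state)

-- ===== LEMMAS AND PROOFS =====

-- A's loop fills the decisions dict with exactly the three per-category filters.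
theorem eeLoop_eq (es : List (List (String × String))) (a b c : List String) :
    es.foldl (fun d e =>
      let result := eeGet e "result"
      if result == some "success" then
        if !eeTruthy (eeGet e "expansion") then
          d.modify "expand_category" [] (· ++ [eeName e])
        else d
      else if result == some "weak" then
        d.modify "re_test" [] (· ++ [eeName e])
      else if result == some "failed" then
        d.modify "stop" [] (· ++ [eeName e])
      else d)
      (PySem.Dict.mk [("expand_category", a), ("expand_channel", []),
                      ("continue_local", []), ("stop", b), ("re_test", c)])
    = PySem.Dict.mk
        [("expand_category", a ++ (es.filter (fun e =>
            eeGet e "result" == some "success" && !eeTruthy (eeGet e "expansion"))).map eeName),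
         ("expand_channel", []), ("continue_local", []),
         ("stop", b ++ (es.filter (fun e => eeGet e "result" == some "failed")).map eeName),
         ("re_test", c ++ (es.filter (fun e => eeGet e "result" == some "weak")).map eeName)] := by
  induction es generalizing a b c with
  | nil => simp
  | cons e es ih =>
    simp only [List.foldl_cons, List.filter_cons]
    by_cases h1 : eeGet e "result" == some "success"
    · by_cases h2 : eeTruthy (eeGet e "expansion")
      · simp only [h1, h2, if_true, Bool.not_true, Bool.if_false_right, Bool.and_false,
          Bool.false_eq_true, if_false, ih]
        have hw : (eeGet e "result" == some "weak") = false := by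
          simp_all
        have hf : (eeGet e "result" == some "failed") = false := by
          simp_all
        simp [hw, hf]
      · have hm : (PySem.Dict.mk [("expand_category", a), ("expand_channel", ([] : List String)),
              ("continue_local", []), ("stop", b), ("re_test", c)]).modify
              "expand_category" [] (· ++ [eeName e])
            = PySem.Dict.mk [("expand_category", a ++ [eeName e]), ("expand_channel", []),
              ("continue_local", []), ("stop", b), ("re_test", c)] := by
          simp [PySem.Dict.modify, PySem.Dict.contains, PySem.Dict.getD, PySem.Dict.get?,
            PySem.Dict.insert]
        have hw : (eeGet e "result" == some "weak") = false := by simp_all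
        have hf : (eeGet e "result" == some "failed") = false := by simp_all
        simp only [h1, h2, Bool.not_false, if_true, hm, ih, hw, hf, Bool.and_true,
          Bool.if_true_right]
        simp [List.append_assoc, h1]
    · have h1' : (eeGet e "result" == some "success") = false := by simp_all
      by_cases hw : eeGet e "result" == some "weak"
      · have hf : (eeGet e "result" == some "failed") = false := by simp_all
        have hm : (PySem.Dict.mk [("expand_category", a), ("expand_channel", ([] : List String)),
              ("continue_local", []), ("stop", b), ("re_test", c)]).modify
              "re_test" [] (· ++ [eeName e])
            = PySem.Dict.mk [("expand_category", a), ("expand_channel", []),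
              ("continue_local", []), ("stop", b), ("re_test", c ++ [eeName e])] := by
          simp [PySem.Dict.modify, PySem.Dict.contains, PySem.Dict.getD, PySem.Dict.get?,
            PySem.Dict.insert]
        simp only [h1', hw, hf, if_false, if_true, Bool.false_eq_true, hm, ih]
        simp [List.append_assoc, h1', hw]
      · have hw' : (eeGet e "result" == some "weak") = false := by simp_all
        by_cases hf : eeGet e "result" == some "failed"
        · have hm : (PySem.Dict.mk [("expand_category", a), ("expand_channel", ([] : List String)),
                ("continue_local", []), ("stop", b), ("re_test", c)]).modify
                "stop" [] (· ++ [eeName e])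
              = PySem.Dict.mk [("expand_category", a), ("expand_channel", []),
                ("continue_local", []), ("stop", b ++ [eeName e]), ("re_test", c)] := by
            simp [PySem.Dict.modify, PySem.Dict.contains, PySem.Dict.getD, PySem.Dict.get?,
              PySem.Dict.insert]
          simp only [h1', hw', hf, if_false, if_true, Bool.false_eq_true, hm, ih]
          simp [List.append_assoc, h1', hw', hf]
        · have hf' : (eeGet e "result" == some "failed") = false := by simp_all
          simp only [if_neg h1, if_neg hw, if_neg hf, h1', hw', hf', Bool.false_and,
            Bool.false_eq_true, if_false]
          exact ih a b c

-- ===== VERDICT (by name: the statement is the Claim_ definition above) =====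
theorem evaluate_expansion_spec : Claim_equal_evaluate_expansion := by
  intro state _ _
  unfold Spec_evaluate_expansion evaluate_expansion evaluate_expansion_alt
  set es := ((PySem.Dict.mk state).get? "element_tests").getD [] with hes
  simp only [eeLoop_eq es [] [] [], eeSpecs, List.foldl_cons, List.foldl_nil]
  set n1 := (es.filter (fun e =>
      eeGet e "result" == some "success" && !eeTruthy (eeGet e "expansion"))).map eeName
  set n2 := (es.filter (fun e => eeGet e "result" == some "weak")).map eeName
  set n3 := (es.filter (fun e => eeGet e "result" == some "failed")).map eeName
  simp only [PySem.Dict.getD, PySem.Dict.get?, PySem.Dict.values]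
  by_cases h1 : n1 = [] <;> by_cases h2 : n2 = [] <;> by_cases h3 : n3 = [] <;>
    simp [h1, h2, h3, PySem.Dict.getD, PySem.Dict.get?, PySem.Dict.values]
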